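-- pv_equiv track=rewrite | github.com/lpalbou/AbstractGateway | src/abstractgateway/maintenance/report_parser.py | _dedent_markdown_literal
-- ===== SOURCE A (Python) =====
-- def _dedent_markdown_literal(text: str) -> str:
--     """Remove a single Markdown-literal indentation level (4 spaces).
--
--     Gateway report templates store user-provided descriptions as indented code
--     blocks to avoid accidental Markdown/HTML rendering. Downstream consumers
--     (triage + proposed backlog drafts) want the raw user text.
--     """
--
--     s = str(text or "").replace("\r\n", "\n").replace("\r", "\n")
--     if not s:
--         return ""
--     lines = s.split("\n")
--     out: list[str] = []
--     for ln in lines: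
--         if ln.startswith("    "):
--             out.append(ln[4:])
--         elif ln.startswith("\t"):
--             out.append(ln[1:])
--         else:
--             out.append(ln)
--     return "\n".join(out).rstrip("\n")
-- ===== SOURCE B (Python) =====
-- def _dedent_markdown_literal(text: str) -> str:
--     """Remove a single Markdown-literal indentation level (4 spaces).
--
--     Single pass over the normalized string: at each line start skip one
--     indentation prefix (4 spaces, else a tab), otherwise copy characters.
--     No intermediate list of lines is built.
--     """
--     s = str(text or "").replace("\r\n", "\n").replace("\r", "\n")
--     chunks = []
--     at_start = True
--     i = 0
--     n = len(s)
--     while i < n: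
--         if at_start:
--             at_start = False
--             if s.startswith("    ", i):
--                 i += 4
--                 continue
--             if s.startswith("\t", i):
--                 i += 1
--                 continue
--         c = s[i]
--         chunks.append(c)
--         at_start = c == "\n"
--         i += 1
--     return "".join(chunks).rstrip("\n")
-- ===== Notes on version B (the rewrite author's own statement) =====
-- stated objective: alternative
-- what changed: Replaces the split-into-lines / per-line-list / join pipeline with a single character-level scan that tracks an at-line-start flag and skips one indentation prefix (4 spaces, else a tab) at each line start, never materializing a list of lines.
import Mathlib
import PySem

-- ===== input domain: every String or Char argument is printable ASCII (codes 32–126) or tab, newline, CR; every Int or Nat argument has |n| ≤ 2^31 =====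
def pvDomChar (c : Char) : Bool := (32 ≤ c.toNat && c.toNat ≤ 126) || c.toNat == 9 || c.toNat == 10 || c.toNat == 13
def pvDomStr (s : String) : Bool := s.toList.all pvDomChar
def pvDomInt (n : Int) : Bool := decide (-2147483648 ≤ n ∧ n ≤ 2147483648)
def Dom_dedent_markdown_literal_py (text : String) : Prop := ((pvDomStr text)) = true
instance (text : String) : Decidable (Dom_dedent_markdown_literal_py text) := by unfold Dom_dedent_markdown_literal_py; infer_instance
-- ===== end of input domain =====

-- B replaces A's split-into-lines / per-line loop / join pipeline by a single character
-- scan with an at-line-start flag (alternative decomposition, same O(n) cost).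

-- ===== PORT A =====
-- shared first line of both Pythons: str(text or "").replace("\r\n","\n").replace("\r","\n")
def pvNormalize (cs : List Char) : List Char :=
  PySem.Chars.replace (PySem.Chars.replace cs "\r\n".toList "\n".toList) "\r".toList "\n".toList

-- hand port of s.rstrip("\n") (strip-set is the single char '\n'); exact: drops exactly the trailing '\n's
def pvRstripNl (cs : List Char) : List Char :=
  (cs.reverse.dropWhile (· == '\n')).reverse

-- A's loop body for one line: startswith "    " → ln[4:], elif startswith "\t" → ln[1:], else ln
def pvDedentLine (ln : List Char) : List Char :=
  if PySem.Chars.startswith ln "    ".toList then PySem.List.slice ln (some 4) none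
  else if PySem.Chars.startswith ln "\t".toList then PySem.List.slice ln (some 1) none
  else ln

def dedent_markdown_literal_py (text : String) : String :=
  let s := pvNormalize text.toList
  if s = [] then ""
  else
    let lines := PySem.Chars.splitOn s "\n".toList
    let out := lines.foldl (fun acc ln => acc ++ [pvDedentLine ln]) ([] : List (List Char))
    String.mk (pvRstripNl (PySem.Chars.join "\n".toList out))

-- ===== PORT B =====
-- Source B's while-loop: at a line start skip "    " (i += 4) or "\t" (i += 1), else copy the
-- char and set at_start to (c == '\n')
def pvScanB (atStart : Bool) (s : List Char) : List Char :=
  match s with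
  | [] => []
  | c :: rest =>
    if atStart && PySem.Chars.startswith (c :: rest) "    ".toList then
      pvScanB false (rest.drop 3)
    else if atStart && PySem.Chars.startswith (c :: rest) "\t".toList then
      pvScanB false rest
    else
      c :: pvScanB (c == '\n') rest
termination_by s.length
decreasing_by all_goals simp <;> omega

def dedent_markdown_literal_py_alt (text : String) : String :=
  String.mk (pvRstripNl (pvScanB true (pvNormalize text.toList)))

-- ===== PRECONDITION & SPEC =====
def Spec_dedent_markdown_literal_py (text : String) (out : String) : Prop := out = dedent_markdown_literal_py_alt text
instance (text : String) (out : String) : Decidable (Spec_dedent_markdown_literal_py text out) := by unfold Spec_dedent_markdown_literal_py; infer_instance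

-- ===== CLAIM (what is proved, stated in full; the proofs are below) =====
def Claim_equal_dedent_markdown_literal_py : Prop := ∀ (text : String), Dom_dedent_markdown_literal_py text → Spec_dedent_markdown_literal_py text (dedent_markdown_literal_py text)

-- ===== LEMMAS AND PROOFS =====

-- reference line-splitter: what s.split("\n") computes, in structural form
def pvLines : List Char → List (List Char)
  | [] => [[]]
  | c :: r => if c = '\n' then [] :: pvLines r
              else (c :: (pvLines r).headI) :: (pvLines r).tail

lemma pvLines_ne_nil (s : List Char) : pvLines s ≠ [] := by
  cases s with
  | nil => simp [pvLines]
  | cons c r => by_cases h : c = '\n' <;> simp [pvLines, h]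

lemma headI_cons_tail_pvLines (s : List Char) :
    (pvLines s).headI :: (pvLines s).tail = pvLines s := by
  cases h : pvLines s with
  | nil => exact absurd h (pvLines_ne_nil s)
  | cons a t => rfl

lemma headI_pvLines (s : List Char) :
    (pvLines s).headI = s.takeWhile (· ≠ '\n') := by
  induction s with
  | nil => simp [pvLines]
  | cons c r ih =>
    by_cases h : c = '\n'
    · simp [pvLines, h, List.takeWhile]
    · simp [pvLines, h, List.takeWhile_cons, ih]

lemma pvLines_append (p r : List Char) (hp : '\n' ∉ p) :
    pvLines (p ++ r) = (p ++ (pvLines r).headI) :: (pvLines r).tail := by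
  induction p with
  | nil => simpa using (headI_cons_tail_pvLines r).symm
  | cons c p' ih =>
    have hc : c ≠ '\n' := fun h => hp (h ▸ List.mem_cons_self ..)
    have hp' : '\n' ∉ p' := fun h => hp (List.mem_cons_of_mem _ h)
    simp [pvLines, hc, ih hp']

-- PySem's fuelled split loop computes pvLines
lemma pv_go (fuel : Nat) : ∀ (l cur : List Char) (accs : List (List Char)),
    l.length ≤ fuel →
    PySem.Chars.splitOn.go ['\n'] fuel l cur accs
      = accs.reverse ++ ((pvLines l).modifyHead (cur.reverse ++ ·)) := by
  induction fuel with
  | zero =>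
    intro l cur accs h
    have : l = [] := List.length_eq_zero_iff.mp (Nat.le_zero.mp h)
    subst this
    simp [PySem.Chars.splitOn.go, pvLines]
  | succ f ih =>
    intro l cur accs h
    cases l with
    | nil => simp [PySem.Chars.splitOn.go, pvLines]
    | cons c rest =>
      by_cases hc : c = '\n'
      · subst hc
        have hpre : List.isPrefixOf ['\n'] ('\n' :: rest) = true := by
          simp [List.isPrefixOf]
        rw [PySem.Chars.splitOn.go]
        simp only [hpre, if_true, List.length_singleton, List.length_nil, List.length_cons,
          List.drop_succ_cons, List.drop_zero]
        rw [ih rest [] (cur.reverse :: accs) (by simpa using Nat.lt_succ_iff.mp (by simpa using h))]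
        rw [← headI_cons_tail_pvLines rest]
        simp [pvLines]
        exact headI_cons_tail_pvLines rest
      · have hpre : List.isPrefixOf ['\n'] (c :: rest) = false := by
          simp [List.isPrefixOf]
          intro hx
          exact absurd hx.symm hc
        rw [PySem.Chars.splitOn.go]
        simp only [hpre, Bool.false_eq_true, if_false]
        rw [ih rest (c :: cur) accs (by simpa using Nat.lt_succ_iff.mp (by simpa using h))]
        rw [← headI_cons_tail_pvLines rest]
        simp [pvLines, hc]

lemma splitOn_eq_pvLines (s : List Char) :
    PySem.Chars.splitOn s ['\n'] = pvLines s := by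
  unfold PySem.Chars.splitOn
  rw [pv_go (s.length + 1) s [] [] (Nat.le_succ _)]
  rw [← headI_cons_tail_pvLines s]
  simp

lemma prefix_takeWhile_iff (p : List Char) (hp : '\n' ∉ p) :
    ∀ s : List Char, (p <+: s.takeWhile (· ≠ '\n') ↔ p <+: s) := by
  induction p with
  | nil => intro s; simp
  | cons a p' ih =>
    intro s
    have ha : a ≠ '\n' := fun h => hp (h ▸ List.mem_cons_self ..)
    have hp' : '\n' ∉ p' := fun h => hp (List.mem_cons_of_mem _ h)
    cases s with
    | nil => simp [List.takeWhile]
    | cons c s' =>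
      by_cases hc : c = '\n'
      · subst hc
        simp [List.takeWhile_cons, List.cons_prefix_cons, ha]
      · simp only [List.takeWhile_cons, hc, List.cons_prefix_cons]
        simp only [decide_not, hc, decide_false, Bool.not_false, if_true]
        simp [List.cons_prefix_cons]
        intro _
        simpa [decide_not] using ih hp' s'

-- the scanner's A-side meanings
def pvF (s : List Char) : List Char := ['\n'].intercalate ((pvLines s).map pvDedentLine)
def pvG (s : List Char) : List Char :=
  ['\n'].intercalate ((pvLines s).headI :: ((pvLines s).tail.map pvDedentLine))

lemma pvScanB_nil (b : Bool) : pvScanB b [] = [] := by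
  rw [pvScanB.eq_def]

lemma pvScanB_cons (b : Bool) (c : Char) (rest : List Char) :
    pvScanB b (c :: rest) =
      if b && PySem.Chars.startswith (c :: rest) "    ".toList then pvScanB false (rest.drop 3)
      else if b && PySem.Chars.startswith (c :: rest) "\t".toList then pvScanB false rest
      else c :: pvScanB (c == '\n') rest := by
  rw [pvScanB.eq_def]

lemma ic_cons (c : Char) (a : List Char) (t : List (List Char)) :
    ['\n'].intercalate ((c :: a) :: t) = c :: ['\n'].intercalate (a :: t) := by
  cases t <;> simp [List.intercalate]

lemma ic_nl (a : List Char) (b : List Char) (t : List (List Char)) :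
    ['\n'].intercalate (a :: b :: t) = a ++ '\n' :: ['\n'].intercalate (b :: t) := by
  simp [List.intercalate]

lemma pvF_eq_headI (s : List Char) :
    pvF s = ['\n'].intercalate (pvDedentLine (pvLines s).headI :: ((pvLines s).tail.map pvDedentLine)) := by
  unfold pvF
  rw [← headI_cons_tail_pvLines s]
  simp

lemma pv_scan_eq (n : Nat) :
    (∀ s : List Char, s.length ≤ n → pvScanB false s = pvG s) ∧
    (∀ s : List Char, s.length ≤ n → pvScanB true s = pvF s) := by
  induction n with
  | zero =>
    constructor <;>
    · intro s hs
      have : s = [] := List.length_eq_zero_iff.mp (Nat.le_zero.mp hs)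
      subst this
      simp [pvScanB, pvF, pvG, pvLines, List.intercalate, pvDedentLine,
            PySem.Chars.startswith, List.isPrefixOf]
  | succ n ih =>
    have hA : ∀ s : List Char, s.length ≤ n + 1 → pvScanB false s = pvG s := by
      intro s hs
      cases s with
      | nil => simp [pvScanB, pvG, pvLines, List.intercalate]
      | cons c r =>
        have hr : r.length ≤ n := by simpa using Nat.lt_succ_iff.mp (by simpa using hs)
        by_cases hc : c = '\n'
        · subst hc
          rw [pvScanB_cons]
          simp only [Bool.false_and, Bool.false_eq_true, if_false]
          have : ('\n' == '\n') = true := by decide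
          rw [this, ih.2 r hr]
          show '\n' :: pvF r = pvG ('\n' :: r)
          unfold pvG
          simp only [pvLines, if_pos rfl, List.headI_cons, List.tail_cons]
          rw [← headI_cons_tail_pvLines r]
          unfold pvF
          rw [← headI_cons_tail_pvLines r]
          simp [ic_nl]
        · rw [pvScanB_cons]
          simp only [Bool.false_and, Bool.false_eq_true, if_false]
          have hcb : (c == '\n') = false := by simpa using hc
          rw [hcb, ih.1 r hr]
          show c :: pvG r = pvG (c :: r)
          unfold pvG
          simp only [pvLines, if_neg hc, List.headI_cons, List.tail_cons]
          rw [ic_cons]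
    refine ⟨hA, ?_⟩
    intro s hs
    by_cases h4 : PySem.Chars.startswith s "    ".toList
    · obtain ⟨t, rfl⟩ : ∃ t, s = [' ', ' ', ' ', ' '] ++ t := by
        have := (PySem.Chars.startswith_iff s "    ".toList).mp h4
        obtain ⟨t, ht⟩ := this
        exact ⟨t, ht.symm⟩
      simp only [List.cons_append, List.nil_append] at h4 ⊢
      rw [pvScanB_cons, h4]
      simp only [Bool.and_self, if_pos rfl, List.drop_succ_cons, List.drop_zero]
      rw [hA t (by simp at hs; omega)]
      have hnl : '\n' ∉ ([' ', ' ', ' ', ' '] : List Char) := by decide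
      unfold pvF pvG
      rw [show (' ' :: ' ' :: ' ' :: ' ' :: t) = [' ', ' ', ' ', ' '] ++ t from rfl,
          pvLines_append _ _ hnl]
      simp only [List.map_cons]
      have hded : pvDedentLine ([' ', ' ', ' ', ' '] ++ (pvLines t).headI) = (pvLines t).headI := by
        unfold pvDedentLine
        have hsw : PySem.Chars.startswith ([' ', ' ', ' ', ' '] ++ (pvLines t).headI) "    ".toList = true := by
          rw [PySem.Chars.startswith_iff]
          exact ⟨(pvLines t).headI, rfl⟩
        rw [if_pos hsw]
        have : PySem.List.slice ([' ', ' ', ' ', ' '] ++ (pvLines t).headI) (some ((4 : Nat) : Int)) none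
            = ([' ', ' ', ' ', ' '] ++ (pvLines t).headI).drop 4 :=
          PySem.List.slice_from_natCast _ 4
        simpa using this
      rw [hded]
      simp
    · by_cases ht : PySem.Chars.startswith s "\t".toList
      · obtain ⟨t, rfl⟩ : ∃ t, s = ['\t'] ++ t := by
          have := (PySem.Chars.startswith_iff s "\t".toList).mp ht
          obtain ⟨t, htp⟩ := this
          exact ⟨t, htp.symm⟩
        simp only [List.cons_append, List.nil_append] at h4 ht ⊢
        have h4' : PySem.Chars.startswith ('\t' :: t) "    ".toList = false := by
          simpa using h4
        rw [pvScanB_cons, h4', ht]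
        simp only [Bool.and_false, Bool.and_self, Bool.false_eq_true, if_false, if_pos rfl]
        rw [hA t (by simp at hs; omega)]
        have hnl : '\n' ∉ (['\t'] : List Char) := by decide
        unfold pvF pvG
        rw [show ('\t' :: t) = ['\t'] ++ t from rfl, pvLines_append _ _ hnl]
        simp only [List.map_cons]
        have hded : pvDedentLine (['\t'] ++ (pvLines t).headI) = (pvLines t).headI := by
          unfold pvDedentLine
          have h4w : PySem.Chars.startswith (['\t'] ++ (pvLines t).headI) "    ".toList = false := by
            show List.isPrefixOf [' ', ' ', ' ', ' '] ('\t' :: (pvLines t).headI) = false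
            rfl
          have htw : PySem.Chars.startswith (['\t'] ++ (pvLines t).headI) "\t".toList = true := by
            rw [PySem.Chars.startswith_iff]
            exact ⟨(pvLines t).headI, rfl⟩
          rw [if_neg (by rw [h4w]; simp), if_pos htw]
          have : PySem.List.slice (['\t'] ++ (pvLines t).headI) (some ((1 : Nat) : Int)) none
              = (['\t'] ++ (pvLines t).headI).drop 1 :=
            PySem.List.slice_from_natCast _ 1
          simpa using this
        rw [hded]
        simp
      · have heq : pvScanB true s = pvScanB false s := by
          cases s with
          | nil => rw [pvScanB_nil, pvScanB_nil]
          | cons c r =>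
            rw [pvScanB_cons, pvScanB_cons]
            simp only [Bool.true_and, Bool.false_and, Bool.false_eq_true, if_false]
            rw [Bool.of_not_eq_true h4, Bool.of_not_eq_true ht]
            simp
        rw [heq, hA s hs]
        rw [pvF_eq_headI]
        unfold pvG
        have hded : pvDedentLine (pvLines s).headI = (pvLines s).headI := by
          unfold pvDedentLine
          have hnl4 : '\n' ∉ "    ".toList := by decide
          have hnlt : '\n' ∉ "\t".toList := by decide
          have h4w : ¬ ("    ".toList <+: (pvLines s).headI) := by
            rw [headI_pvLines, prefix_takeWhile_iff _ hnl4]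
            rw [← PySem.Chars.startswith_iff]
            simpa using h4
          have htw : ¬ ("\t".toList <+: (pvLines s).headI) := by
            rw [headI_pvLines, prefix_takeWhile_iff _ hnlt]
            rw [← PySem.Chars.startswith_iff]
            simpa using ht
          rw [if_neg (by rw [PySem.Chars.startswith_iff] at *; exact h4w),
              if_neg (by rw [PySem.Chars.startswith_iff] at *; exact htw)]
        rw [hded]

lemma pv_true_full (s : List Char) :
    ['\n'].intercalate ((PySem.Chars.splitOn s ['\n']).map pvDedentLine) = pvScanB true s := by
  rw [splitOn_eq_pvLines]
  exact ((pv_scan_eq s.length).2 s le_rfl).symm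

-- ===== VERDICT (by name: the statement is the Claim_ definition above) =====
theorem dedent_markdown_literal_py_spec : Claim_equal_dedent_markdown_literal_py := by
  intro text _
  unfold Spec_dedent_markdown_literal_py dedent_markdown_literal_py dedent_markdown_literal_py_alt
  by_cases h : pvNormalize text.toList = []
  · simp [h, pvScanB_nil, pvRstripNl]
    rfl
  · simp only [if_neg h]
    rw [PySem.List.foldl_append_singleton_eq_map]
    have hnl : ("\n".toList : List Char) = ['\n'] := rfl
    simp only [PySem.Chars.join, hnl, List.nil_append]
    rw [pv_true_full]
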